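-- pv_equiv track=rewrite | github.com/sravanigodavarthi/DSA-Python | Arrays_and_strings/reverse string on encountering i.py | string_modification
-- ===== SOURCE A (Python) =====
-- def string_modification(input):
--     out = ""
--     right_part= ""
--     left_part = ""
--     end_pointer = 0
--     for index,char in enumerate(input):
--         if char == 'i':
--             right_part+=input[end_pointer:index:][::-1]
--             end_pointer = index+1
--     left_part = input[end_pointer::]
--     out = right_part + left_part
--     return out
-- ===== SOURCE B (Python) =====
-- def string_modification(input):
--     # recursive partition at the first 'i': reverse the prefix, recurse on the rest
--     i = input.find('i')
--     if i == -1: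
--         return input
--     return input[:i][::-1] + string_modification(input[i+1:])
-- ===== Notes on version B (the rewrite author's own statement) =====
-- stated objective: simpler
-- what changed: Replaced A's enumerate loop with end_pointer bookkeeping and repeated string-concatenation onto an accumulator by a short recursion that partitions at the first delimiter, reverses the prefix and recurses on the remainder.
import Mathlib
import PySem

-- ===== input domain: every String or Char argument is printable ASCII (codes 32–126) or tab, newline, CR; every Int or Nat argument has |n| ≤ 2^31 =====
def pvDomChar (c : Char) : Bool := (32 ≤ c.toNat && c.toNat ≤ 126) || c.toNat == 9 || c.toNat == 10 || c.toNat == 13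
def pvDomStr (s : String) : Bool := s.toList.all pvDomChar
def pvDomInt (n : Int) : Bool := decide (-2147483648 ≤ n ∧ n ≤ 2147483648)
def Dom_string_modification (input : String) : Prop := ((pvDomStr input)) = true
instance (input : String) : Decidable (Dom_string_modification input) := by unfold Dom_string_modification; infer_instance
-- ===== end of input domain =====

-- B replaces A's enumerate loop with pointer bookkeeping by a recursion that partitions at the first 'i' (objective: simpler).

-- ===== PORT A =====
-- step of A's for-loop: state (right_part, end_pointer); input[ep:idx][::-1] is slice + reverse
def pvStepA (xs : List Char) (st : List Char × Int) (p : Int × Char) : List Char × Int :=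
  if p.2 = 'i' then (st.1 ++ (PySem.List.slice xs (some st.2) (some p.1)).reverse, p.1 + 1)
  else st

def string_modification (input : String) : String :=
  let xs := input.toList
  let st := (PySem.List.enumerate xs 0).foldl (pvStepA xs) (([] : List Char), (0 : Int))
  String.ofList (st.1 ++ PySem.List.slice xs (some st.2) none)

-- ===== PORT B =====
-- Source B's recursion: i = s.find('i'); if i == -1 return s; else s[:i][::-1] + rec(s[i+1:])
def pvAltGo (s : List Char) : List Char :=
  let i := PySem.Chars.find s ['i']
  if h : i = -1 then s
  else
    have hlt : (PySem.List.slice s (some (i + 1)) none).length < s.length := by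
      have h0 : (0:Int) ≤ i := by
        have := PySem.Chars.neg_one_le_find s ['i']
        omega
      have hs := PySem.Chars.find_spec (s := s) (sub := ['i']) h0
      have hmem : 'i' ∈ s.drop i.toNat := hs.1.subset (by simp)
      have hlen : i.toNat < s.length := by
        by_contra hc
        simp [List.drop_eq_nil_of_le (by omega : s.length ≤ i.toNat)] at hmem
      rw [PySem.List.slice_from s (by omega : (0:Int) ≤ i + 1)]
      have : (i + 1).toNat = i.toNat + 1 := by omega
      rw [this]
      simp [List.length_drop]
      omega
    (PySem.List.slice s none (some i)).reverse ++ pvAltGo (PySem.List.slice s (some (i + 1)) none)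
termination_by s.length

def string_modification_alt (input : String) : String := String.ofList (pvAltGo input.toList)

-- ===== PRECONDITION & SPEC =====
def Spec_string_modification (input : String) (out : String) : Prop := out = string_modification_alt input
instance (input : String) (out : String) : Decidable (Spec_string_modification input out) := by unfold Spec_string_modification; infer_instance

-- ===== CLAIM (what is proved, stated in full; the proofs are below) =====
def Claim_equal_string_modification : Prop := ∀ (input : String), Dom_string_modification input → Spec_string_modification input (string_modification input)

-- ===== LEMMAS AND PROOFS =====

-- ['i'] as a prefix means the head is 'i'
lemma singleton_prefix_iff (l : List Char) : ['i'] <+: l ↔ ∃ t, l = 'i' :: t := by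
  cases l with
  | nil => simp
  | cons x t => simp [List.cons_prefix_cons, eq_comm]

lemma singleton_infix_iff (l : List Char) : ['i'] <:+: l ↔ 'i' ∈ l := by
  constructor
  · intro h; exact h.subset (by simp)
  · intro h
    obtain ⟨pre, suf, hps⟩ := List.append_of_mem h
    exact ⟨pre, suf, by simp [hps]⟩

-- no 'i' ⇒ find = -1 ⇒ pvAltGo is the identity
lemma pvAltGo_of_not_mem (l : List Char) (h : 'i' ∉ l) : pvAltGo l = l := by
  rw [pvAltGo]
  have : PySem.Chars.find l ['i'] = -1 :=
    (PySem.Chars.find_eq_neg_one_iff _ _).mpr (by rw [singleton_infix_iff]; exact h)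
  simp [this]

lemma find_append_cons (u v : List Char) (h : 'i' ∉ u) :
    PySem.Chars.find (u ++ 'i' :: v) ['i'] = (u.length : Int) := by
  set l := u ++ 'i' :: v with hl
  have hinf : ['i'] <:+: l := (singleton_infix_iff l).mpr (by simp [hl])
  have h0 : (0:Int) ≤ PySem.Chars.find l ['i'] := (PySem.Chars.find_nonneg_iff _ _).mpr hinf
  obtain ⟨hpre, hmin⟩ := PySem.Chars.find_spec (s := l) (sub := ['i']) h0
  have hat : ['i'] <+: l.drop u.length := by
    rw [hl, List.drop_left]
    exact ⟨v, rfl⟩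
  have hle : (PySem.Chars.find l ['i']).toNat ≤ u.length := by
    by_contra hc
    exact hmin u.length (by omega) hat
  have hge : u.length ≤ (PySem.Chars.find l ['i']).toNat := by
    by_contra hc
    obtain ⟨t, ht⟩ := (singleton_prefix_iff _).mp hpre
    have hget : l[(PySem.Chars.find l ['i']).toNat]? = some 'i' := by
      have h2 : (List.drop (PySem.Chars.find l ['i']).toNat l)[0]? = l[(PySem.Chars.find l ['i']).toNat + 0]? :=
        List.getElem?_drop
      rw [ht] at h2
      simpa using h2.symm
    have hlt' : (PySem.Chars.find l ['i']).toNat < u.length := by omega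
    rw [hl, List.getElem?_append_left hlt'] at hget
    exact h (List.mem_of_getElem? hget)
  omega

-- partition step for pvAltGo
lemma pvAltGo_append (u v : List Char) (h : 'i' ∉ u) :
    pvAltGo (u ++ 'i' :: v) = u.reverse ++ pvAltGo v := by
  rw [pvAltGo]
  have hf := find_append_cons u v h
  have hne : (u.length : Int) ≠ -1 := by omega
  simp only [hf, dif_neg hne]
  congr 1
  · congr 1
    rw [PySem.List.slice_to _ (by omega : (0:Int) ≤ (u.length : Int))]
    simp
  · congr 1
    rw [PySem.List.slice_from _ (by omega : (0:Int) ≤ (u.length : Int) + 1)]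
    have h1 : ((u.length : Int) + 1).toNat = u.length + 1 := by omega
    rw [h1]
    rw [show u.length + 1 = (u ++ ['i']).length by simp]
    rw [show u ++ 'i' :: v = (u ++ ['i']) ++ v by simp]
    exact List.drop_left

-- main loop invariant for A's fold
lemma mainA (xs : List Char) : ∀ (ys : List Char) (k ep : Nat) (acc : List Char),
    ys.drop k = xs → ep ≤ k → 'i' ∉ (ys.drop ep).take (k - ep) →
    (((PySem.List.enumerate xs (k : Int)).foldl (pvStepA ys) (acc, ((ep : Nat) : Int))).1
      ++ PySem.List.slice ys
          (some (((PySem.List.enumerate xs (k : Int)).foldl (pvStepA ys) (acc, ((ep : Nat) : Int))).2)) none)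
    = acc ++ pvAltGo (ys.drop ep) := by
  induction xs with
  | nil =>
    intro ys k ep acc hk hle hni
    simp only [PySem.List.enumerate_nil, List.foldl_nil]
    rw [PySem.List.slice_from ys (by omega : (0:Int) ≤ (ep : Int))]
    have hlen : ys.length ≤ k := by
      have := congrArg List.length hk
      simp at this
      omega
    have hall : (ys.drop ep).take (k - ep) = ys.drop ep :=
      List.take_of_length_le (by simp; omega)
    rw [hall] at hni
    rw [pvAltGo_of_not_mem _ hni]
    simp
  | cons c t ih =>
    intro ys k ep acc hk hle hni
    have hdk1 : ys.drop (k + 1) = t := by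
      have : List.drop 1 (ys.drop k) = List.drop 1 (c :: t) := by rw [hk]
      simpa [List.drop_drop, Nat.add_comm] using this
    have hgk : ys[k]? = some c := by
      have h2 : (ys.drop k)[0]? = ys[k + 0]? := List.getElem?_drop
      rw [hk] at h2
      simpa using h2.symm
    rw [PySem.List.enumerate_cons, List.foldl_cons]
    by_cases hc : c = 'i'
    · -- 'i' found at index k
      have hstep : pvStepA ys (acc, ((ep:Nat):Int)) ((k:Int), c)
          = (acc ++ (PySem.List.slice ys (some ((ep:Nat):Int)) (some (k:Int))).reverse, (k:Int) + 1) := by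
        simp [pvStepA, hc]
      rw [hstep]
      have hcast : (k : Int) + 1 = ((k + 1 : Nat) : Int) := by push_cast; ring
      rw [hcast]
      have := ih ys (k + 1) (k + 1)
        (acc ++ (PySem.List.slice ys (some ((ep:Nat):Int)) (some (k:Int))).reverse)
        hdk1 (le_refl _) (by simp)
      rw [this]
      have hsl : PySem.List.slice ys (some ((ep:Nat):Int)) (some (k:Int))
          = (ys.drop ep).take (k - ep) := PySem.List.slice_natCast ys ep k
      have hsplit : ys.drop ep = (ys.drop ep).take (k - ep) ++ 'i' :: t := by
        conv_lhs => rw [← List.take_append_drop (k - ep) (ys.drop ep)]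
        congr 1
        rw [List.drop_drop]
        have h3 : ep + (k - ep) = k := by omega
        rw [h3, hk, hc]
      rw [hdk1, hsl]
      conv_rhs => rw [hsplit, pvAltGo_append _ _ hni]
      simp
    · -- not 'i': state unchanged
      have hstep : pvStepA ys (acc, ((ep:Nat):Int)) ((k:Int), c) = (acc, ((ep:Nat):Int)) := by
        simp [pvStepA, hc]
      rw [hstep]
      have hcast : (k : Int) + 1 = ((k + 1 : Nat) : Int) := by push_cast; ring
      rw [hcast]
      apply ih ys (k + 1) ep acc hdk1 (by omega)
      have htk : (ys.drop ep).take (k + 1 - ep) = (ys.drop ep).take (k - ep) ++ ys[k]?.toList := by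
        have h1 : k + 1 - ep = (k - ep) + 1 := by omega
        rw [h1, List.take_add_one]
        congr 1
        have h2 : (ys.drop ep)[k - ep]? = ys[ep + (k - ep)]? := List.getElem?_drop
        rw [h2, show ep + (k - ep) = k from by omega]
      rw [htk, hgk]
      simp [List.mem_append]
      exact ⟨hni, fun h => hc h.symm⟩

-- ===== VERDICT (by name: the statement is the Claim_ definition above) =====
theorem string_modification_spec : Claim_equal_string_modification := by
  intro input _
  unfold Spec_string_modification string_modification string_modification_alt
  have h := mainA input.toList input.toList 0 0 [] (by simp) (le_refl _) (by simp)
  simp only [Nat.cast_zero, List.drop_zero, List.nil_append] at h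
  simp only []
  rw [h]
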